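-- pv_equiv track=rewrite | github.com/tara0017/Advent-of-Code | 2020/day6.py | consensus_yes
-- ===== SOURCE A (Python) =====
-- def consensus_yes(g):
--     answered_yes = set()
--
--     # add all of 1st person's answers
--     for q in g[0]:
--         answered_yes.add(q)
--
--     # check the rest of the people in the group
--     for i in range(1, len(g)):
--         items_to_remove = []
--
--         # check each existing answer against next person's answers
--         for a in answered_yes:
--             if a not in g[i]:
--                 items_to_remove.append(a)
--
--         # remove answers that do not appear for this individual
--         for item in items_to_remove:
--             answered_yes.remove(item)
--
--     return len(answered_yes)
-- ===== SOURCE B (Python) =====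
-- def consensus_yes(g):
--     counts = {}
--     for person in g:
--         for c in dict.fromkeys(person):
--             counts[c] = counts.get(c, 0) + 1
--     return sum(1 for v in counts.values() if v == len(g))
-- ===== Notes on version B (the rewrite author's own statement) =====
-- stated objective: alternative
-- what changed: B replaces A's running-intersection set with in-loop removal by one counting pass (a dict tallying, per person, each deduplicated answer) followed by counting the letters whose tally equals the group size.
import Mathlib
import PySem

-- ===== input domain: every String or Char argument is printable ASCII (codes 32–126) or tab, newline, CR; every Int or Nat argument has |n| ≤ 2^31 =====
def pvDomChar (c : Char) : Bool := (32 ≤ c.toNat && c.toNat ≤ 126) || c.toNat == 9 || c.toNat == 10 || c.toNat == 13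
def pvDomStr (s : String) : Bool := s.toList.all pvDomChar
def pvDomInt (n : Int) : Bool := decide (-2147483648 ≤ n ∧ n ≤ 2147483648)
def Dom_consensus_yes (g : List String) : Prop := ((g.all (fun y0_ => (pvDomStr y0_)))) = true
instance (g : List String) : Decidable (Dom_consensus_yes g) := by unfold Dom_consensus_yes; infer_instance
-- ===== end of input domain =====

-- B replaces A's running-intersection set (with in-loop removal) by one counting pass over
-- per-person deduplicated answers plus a final tally of letters counted len(g) times; objective: alternative.

-- ===== PORT A =====
def consensus_yes (g : List String) : Int :=
  match PySem.List.pyGet? g 0 with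
  | none => 0   -- g[0] raises IndexError on the empty group; excluded by Pre_
  | some g0 =>
    -- answered_yes = set(); for q in g[0]: answered_yes.add(q)
    let answered0 : PySem.Set Char := g0.toList.foldl (fun s q => PySem.Set.add s q) []
    -- for i in range(1, len(g)): …
    let answered : PySem.Set Char :=
      (PySem.List.pyRange 1 (g.length : Int)).foldl (fun ans i =>
        let gi := (PySem.List.pyGetD g i "").toList   -- index i is always in range here
        -- items_to_remove: a for a in answered_yes if a not in g[i]
        let items := ans.foldl (fun acc a => if !gi.contains a then acc ++ [a] else acc) []
        -- answered_yes.remove(item): every listed item is a member, so remove = discard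
        items.foldl (fun s item => PySem.Set.discard s item) ans) answered0
    (answered.length : Int)

-- ===== PORT B =====
def consensus_yes_alt (g : List String) : Int :=
  let counts : PySem.Dict Char Int :=
    g.foldl (fun d person =>
      (PySem.List.dedup person.toList).foldl (fun d c => d.insert c (d.getD c 0 + 1)) d)
      PySem.Dict.empty
  counts.values.foldl (fun acc v => if v == (g.length : Int) then acc + 1 else acc) 0

-- ===== PRECONDITION & SPEC =====
-- Pre_ excludes only the empty group, on which A raises IndexError at g[0].
def Pre_consensus_yes (g : List String) : Prop := g ≠ []
instance (g : List String) : Decidable (Pre_consensus_yes g) := by unfold Pre_consensus_yes; infer_instance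
def pvWitness_consensus_yes : List String := ["ab", "b"]

def Spec_consensus_yes (g : List String) (out : Int) : Prop := out = consensus_yes_alt g
instance (g : List String) (out : Int) : Decidable (Spec_consensus_yes g out) := by unfold Spec_consensus_yes; infer_instance

-- ===== CLAIM (what is proved, stated in full; the proofs are below) =====
def Claim_equal_consensus_yes : Prop := ∀ (g : List String), Dom_consensus_yes g → Pre_consensus_yes g → Spec_consensus_yes g (consensus_yes g)

-- ===== LEMMAS AND PROOFS =====

-- folding `discard` over a list of items filters all of them out at once
theorem foldl_discard_eq_filter (items ans : List Char) :
    items.foldl (fun s item => PySem.Set.discard s item) ans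
      = ans.filter (fun a => !items.contains a) := by
  induction items generalizing ans with
  | nil => simp
  | cons x t ih =>
      rw [List.foldl_cons, ih]
      simp only [PySem.Set.discard, List.filter_filter]
      apply List.filter_congr
      intro a _
      by_cases h : a = x <;> simp [h]

-- one iteration of A's outer loop keeps exactly the answers the current person gave
theorem stepA_eq_filter (ans gi : List Char) :
    (ans.foldl (fun acc a => if !gi.contains a then acc ++ [a] else acc) []).foldl
        (fun s item => PySem.Set.discard s item) ans
      = ans.filter (fun a => gi.contains a) := by
  have hif := PySem.List.foldl_append_if (p := fun a => !gi.contains a) (f := id) ans []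
  simp only [id, List.nil_append, List.map_id] at hif
  rw [hif, foldl_discard_eq_filter]
  apply List.filter_congr
  intro a ha
  by_cases h : gi.contains a <;> simp [ha]

-- folding filters over a list of indices is one filter by the conjunction
theorem foldl_filter_all {ι : Type} (idxs : List ι) (s : List Char) (P : ι → Char → Bool) :
    idxs.foldl (fun ans i => ans.filter (P i)) s = s.filter (fun a => idxs.all (fun i => P i a)) := by
  induction idxs generalizing s with
  | nil => simp
  | cons x t ih => simp [List.foldl_cons, ih, List.filter_filter, Bool.and_comm]

-- indexing g[i] for i in range(k, k + |rest|) over g = pre ++ rest walks rest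
theorem all_pyRange_getD (rest pre : List String) (f : String → Bool) :
    (PySem.List.pyRange (pre.length : Int) ((pre.length + rest.length : Nat) : Int)).all
        (fun i => f (PySem.List.pyGetD (pre ++ rest) i ""))
      = rest.all f := by
  induction rest generalizing pre with
  | nil => simp [PySem.List.pyRange_one_eq_nil]
  | cons x t ih =>
      rw [PySem.List.pyRange_one_cons
        (by exact_mod_cast Nat.lt_add_of_pos_right (Nat.succ_pos t.length))]
      have h1 : ((pre.length : Int) + 1) = ((pre ++ [x]).length : Nat) := by simp
      have h2 : ((pre.length + (x :: t).length : Nat) : Int)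
          = (((pre ++ [x]).length + t.length : Nat) : Int) := by simp; omega
      have h3 : pre ++ x :: t = (pre ++ [x]) ++ t := by simp
      simp only [List.all_cons, h1, h2, h3, ih (pre ++ [x])]
      congr 1
      rw [PySem.List.pyGetD_natCast]
      simp [List.getD]

-- A computes the tally of first-person answers given by everyone else
theorem consensus_yes_eq (g0 : String) (rest : List String) :
    consensus_yes (g0 :: rest)
      = (((PySem.Set.ofList g0.toList).filter
            (fun a => rest.all (fun p => p.toList.contains a))).length : Int) := by
  have h0 : PySem.List.pyGet? (g0 :: rest) (0 : Int) = some g0 := by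
    simp [PySem.List.pyGet?, PySem.List.pyIdx?]
  simp only [consensus_yes, h0]
  have hstep : (fun (ans : List Char) (i : Int) =>
      let gi := (PySem.List.pyGetD (g0 :: rest) i "").toList
      let items := ans.foldl (fun acc a => if !gi.contains a then acc ++ [a] else acc) []
      items.foldl (fun s item => PySem.Set.discard s item) ans)
      = fun ans i => ans.filter (fun a => (PySem.List.pyGetD (g0 :: rest) i "").toList.contains a) := by
    funext ans i
    exact stepA_eq_filter ans _
  rw [hstep, foldl_filter_all, ← PySem.Set.ofList_eq_foldl]
  apply congrArg
  apply congrArg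
  apply List.filter_congr
  intro a _
  have := all_pyRange_getD rest [g0] (fun p => p.toList.contains a)
  simpa [Nat.add_comm] using this

-- the count of c over the per-person deduplicated answers counts the persons answering c
theorem count_flatMap_dedup (g : List String) (c : Char) :
    (g.flatMap (fun p => PySem.List.dedup p.toList)).count c
      = g.countP (fun p => p.toList.contains c) := by
  induction g with
  | nil => rfl
  | cons p t ih =>
      rw [List.flatMap_cons, List.count_append, ih, List.countP_cons]
      have hnd : (PySem.List.dedup p.toList).Nodup := PySem.List.nodup_dedup _
      rw [List.Nodup.count hnd]
      by_cases h : c ∈ p.toList <;>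
        simp [h, Nat.add_comm]

-- B's nested fold is the fold over the concatenation
theorem foldl_foldl_flatMap {α β : Type} (g : List α) (h : α → List Char)
    (f : β → Char → β) (init : β) :
    g.foldl (fun d p => (h p).foldl f d) init = (g.flatMap h).foldl f init := by
  induction g generalizing init with
  | nil => rfl
  | cons p t ih => rw [List.foldl_cons, List.flatMap_cons, List.foldl_append, ih]

-- B computes the number of distinct answers whose person-count is the group size
theorem consensus_yes_alt_eq (g : List String) :
    consensus_yes_alt g
      = (((PySem.Set.ofList (g.flatMap (fun p => PySem.List.dedup p.toList))).filter
            (fun c => (g.flatMap (fun p => PySem.List.dedup p.toList)).count c == g.length)).length : Int) := by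
  simp only [consensus_yes_alt]
  rw [foldl_foldl_flatMap (β := PySem.Dict Char Int) g (fun p => PySem.List.dedup p.toList)
      (fun d c => d.insert c (d.getD c 0 + 1)) PySem.Dict.empty]
  set L := g.flatMap (fun p => PySem.List.dedup p.toList) with hL
  set d : PySem.Dict Char Int := L.foldl (fun d c => d.insert c (d.getD c 0 + 1)) PySem.Dict.empty with hd
  have hkeys : d.keys = PySem.Set.ofList L := by
    rw [hd, PySem.Dict.keys_foldl_insert L (fun d x => d.getD x 0 + 1)]
    rfl
  have hnd : d.keys.Nodup := by rw [hkeys]; exact PySem.Set.nodup_ofList L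
  have hget : ∀ c, d.getD c 0 = (L.count c : Int) := by
    intro c
    rw [hd, PySem.Dict.getD_foldl_insert_add_one]
    simp [PySem.Dict.getD_empty]
  rw [PySem.Dict.values_eq_map_keys d hnd 0, List.foldl_map, hkeys]
  rw [PySem.List.foldl_count_if (fun c => d.getD c 0 == (g.length : Int)) (PySem.Set.ofList L) 0]
  rw [List.countP_eq_length_filter, zero_add]
  congr 2
  apply List.filter_congr
  intro c _
  rw [hget c]
  by_cases h : L.count c = g.length <;> simp [h]

-- the two filtered lists have the same members, hence (being Nodup) the same length
theorem filters_same_length (g0 : String) (rest : List String) :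
    ((PySem.Set.ofList g0.toList).filter
        (fun a => rest.all (fun p => p.toList.contains a))).length
      = ((PySem.Set.ofList ((g0 :: rest).flatMap (fun p => PySem.List.dedup p.toList))).filter
          (fun c => ((g0 :: rest).flatMap (fun p => PySem.List.dedup p.toList)).count c
              == (g0 :: rest).length)).length := by
  apply List.Perm.length_eq
  rw [List.perm_ext_iff_of_nodup
    ((PySem.Set.nodup_ofList _).filter _) ((PySem.Set.nodup_ofList _).filter _)]
  intro a
  simp only [List.mem_filter, PySem.Set.mem_ofList, count_flatMap_dedup, List.mem_flatMap,
    PySem.List.mem_dedup, List.all_eq_true, List.contains_eq_mem, beq_iff_eq, decide_eq_true_eq]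
  constructor
  · rintro ⟨ha0, hall⟩
    have hall' : ∀ p ∈ g0 :: rest, a ∈ p.toList := by
      intro p hp
      rcases List.mem_cons.mp hp with h | h
      · exact h ▸ ha0
      · exact hall p h
    refine ⟨⟨g0, List.mem_cons_self, ha0⟩, ?_⟩
    have : (g0 :: rest).countP (fun p => p.toList.contains a) = (g0 :: rest).length :=
      List.countP_eq_length.mpr (by intro p hp; simpa using hall' p hp)
    simpa using this
  · rintro ⟨-, hcnt⟩
    have : ∀ p ∈ g0 :: rest, (fun p : String => p.toList.contains a) p = true :=
      List.countP_eq_length.mp (by simpa using hcnt)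
    refine ⟨by simpa using this g0 List.mem_cons_self, fun p hp => by
      simpa using this p (List.mem_cons_of_mem _ hp)⟩

-- ===== VERDICT (by name: the statement is the Claim_ definition above) =====
theorem consensus_yes_spec : Claim_equal_consensus_yes := by
  intro g _ hpre
  unfold Spec_consensus_yes
  match g with
  | [] => exact absurd rfl hpre
  | g0 :: rest =>
      rw [consensus_yes_eq, consensus_yes_alt_eq, filters_same_length]
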